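-- pv_equiv track=rewrite | github.com/DeveshK1256/origin | backend/services/job_matching.py | _split_required_and_preferred_skills
-- ===== SOURCE A (Python) =====
-- def _split_required_and_preferred_skills(text: str, extracted_skills: list[str]) -> tuple[list[str], list[str]]:
--     lines = [line.strip().lower() for line in text.splitlines() if line.strip()]
--     required_lines = [
--         line
--         for line in lines
--         if any(token in line for token in ("must", "required", "qualification", "requirements", "mandatory"))
--     ]
--     preferred_lines = [
--         line for line in lines if any(token in line for token in ("preferred", "nice to have", "plus", "good to have"))
--     ]
--
--     required = []
--     preferred = []
--     for skill in extracted_skills: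
--         lowered_skill = skill.lower()
--         if any(lowered_skill in line for line in preferred_lines):
--             preferred.append(skill)
--         elif any(lowered_skill in line for line in required_lines):
--             required.append(skill)
--
--     remaining = [skill for skill in extracted_skills if skill not in required and skill not in preferred]
--     required.extend(remaining)
--
--     # Keep deterministic order and remove duplicates
--     required = list(dict.fromkeys(required))
--     preferred = [skill for skill in dict.fromkeys(preferred) if skill not in required]
--     return required, preferred
-- ===== SOURCE B (Python) =====
-- def _split_required_and_preferred_skills(text: str, extracted_skills: list[str]) -> tuple[list[str], list[str]]:
--     lines = [line.strip().lower() for line in text.splitlines() if line.strip()]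
--     pref_lines = [l for l in lines if any(t in l for t in ("preferred", "nice to have", "plus", "good to have"))]
--     req_lines = [l for l in lines if any(t in l for t in ("must", "required", "qualification", "requirements", "mandatory"))]
--     seen = set()
--     required, later, preferred = [], [], []
--     for skill in extracted_skills:
--         if skill in seen:
--             continue
--         seen.add(skill)
--         low = skill.lower()
--         if any(low in l for l in pref_lines):
--             preferred.append(skill)
--         elif any(low in l for l in req_lines):
--             required.append(skill)
--         else:
--             later.append(skill)
--     return required + later, preferred
-- ===== Notes on version B (the rewrite author's own statement) =====
-- stated objective: faster
-- what changed: B replaces A's four passes over the skill list (classify into two lists, recompute leftovers via quadratic list-membership tests, dedup, cross-filter preferred against required) with a single pass keeping a seen-set and three class accumulators (required/unclassified/preferred), returning required+unclassified directly.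
import Mathlib
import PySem

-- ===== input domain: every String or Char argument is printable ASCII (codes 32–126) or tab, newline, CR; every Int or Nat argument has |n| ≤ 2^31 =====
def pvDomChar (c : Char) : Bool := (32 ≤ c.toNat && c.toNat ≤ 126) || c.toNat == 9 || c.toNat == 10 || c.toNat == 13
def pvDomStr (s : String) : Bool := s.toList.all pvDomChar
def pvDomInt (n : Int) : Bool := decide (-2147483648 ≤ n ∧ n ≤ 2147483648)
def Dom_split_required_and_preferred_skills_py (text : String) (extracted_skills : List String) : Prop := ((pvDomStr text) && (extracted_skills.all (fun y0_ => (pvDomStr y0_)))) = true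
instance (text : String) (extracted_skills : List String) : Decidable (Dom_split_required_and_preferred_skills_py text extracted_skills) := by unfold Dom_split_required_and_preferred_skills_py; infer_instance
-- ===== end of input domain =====

-- B replaces A's four passes over the skill list (classify, recompute the leftovers by
-- quadratic list-membership tests, dedup, cross-filter) by ONE pass with a seen-set and
-- three class accumulators; same return value, measured faster in a timing run.

-- ===== PORT A =====
def pvReqTokens : List String := ["must", "required", "qualification", "requirements", "mandatory"]
def pvPrefTokens : List String := ["preferred", "nice to have", "plus", "good to have"]

def split_required_and_preferred_skills_py (text : String) (extracted_skills : List String) : List String × List String :=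
  let lines := ((PySem.Str.splitlines text).filter (fun line => PySem.Str.strip line != "")).map
      (fun line => PySem.Str.lower (PySem.Str.strip line))
  let required_lines := lines.filter (fun line => pvReqTokens.any (fun token => PySem.Str.isIn token line))
  let preferred_lines := lines.filter (fun line => pvPrefTokens.any (fun token => PySem.Str.isIn token line))
  let rp := extracted_skills.foldl (fun (acc : List String × List String) skill =>
      let lowered_skill := PySem.Str.lower skill
      if preferred_lines.any (fun line => PySem.Str.isIn lowered_skill line) then (acc.1, acc.2 ++ [skill])
      else if required_lines.any (fun line => PySem.Str.isIn lowered_skill line) then (acc.1 ++ [skill], acc.2)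
      else acc) ([], [])
  let remaining := extracted_skills.filter (fun skill => !(rp.1.contains skill) && !(rp.2.contains skill))
  let required := PySem.List.dedup (rp.1 ++ remaining)
  let preferred := (PySem.List.dedup rp.2).filter (fun skill => !(required.contains skill))
  (required, preferred)

-- ===== PORT B =====
def split_required_and_preferred_skills_py_alt (text : String) (extracted_skills : List String) : List String × List String :=
  let lines := ((PySem.Str.splitlines text).filter (fun line => PySem.Str.strip line != "")).map
      (fun line => PySem.Str.lower (PySem.Str.strip line))
  let pref_lines := lines.filter (fun line => pvPrefTokens.any (fun token => PySem.Str.isIn token line))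
  let req_lines := lines.filter (fun line => pvReqTokens.any (fun token => PySem.Str.isIn token line))
  let st := extracted_skills.foldl
    (fun (st : PySem.Set String × List String × List String × List String) skill =>
      if PySem.Set.contains st.1 skill then st
      else
        let seen := PySem.Set.add st.1 skill
        let low := PySem.Str.lower skill
        if pref_lines.any (fun line => PySem.Str.isIn low line) then
          (seen, st.2.1, st.2.2.1, st.2.2.2 ++ [skill])
        else if req_lines.any (fun line => PySem.Str.isIn low line) then
          (seen, st.2.1 ++ [skill], st.2.2.1, st.2.2.2)
        else
          (seen, st.2.1, st.2.2.1 ++ [skill], st.2.2.2))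
    (PySem.Set.empty, [], [], [])
  (st.2.1 ++ st.2.2.1, st.2.2.2)

-- ===== PRECONDITION & SPEC =====
def Spec_split_required_and_preferred_skills_py (text : String) (extracted_skills : List String) (out : List String × List String) : Prop := out = split_required_and_preferred_skills_py_alt text extracted_skills
instance (text : String) (extracted_skills : List String) (out : List String × List String) : Decidable (Spec_split_required_and_preferred_skills_py text extracted_skills out) := by unfold Spec_split_required_and_preferred_skills_py; infer_instance

-- ===== CLAIM (what is proved, stated in full; the proofs are below) =====
def Claim_equal_split_required_and_preferred_skills_py : Prop := ∀ (text : String) (extracted_skills : List String), Dom_split_required_and_preferred_skills_py text extracted_skills → Spec_split_required_and_preferred_skills_py text extracted_skills (split_required_and_preferred_skills_py text extracted_skills)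

-- ===== LEMMAS AND PROOFS =====

-- classification test: does the lowered skill occur in one of the given lines
def pvHit (ls : List String) (s : String) : Bool :=
  ls.any (fun line => PySem.Str.isIn (PySem.Str.lower s) line)

-- A's loop body and B's loop body, named so the proofs can speak about them
def pvAStep (pl rl : List String) (acc : List String × List String) (skill : String) :
    List String × List String :=
  let lowered_skill := PySem.Str.lower skill
  if pl.any (fun line => PySem.Str.isIn lowered_skill line) then (acc.1, acc.2 ++ [skill])
  else if rl.any (fun line => PySem.Str.isIn lowered_skill line) then (acc.1 ++ [skill], acc.2)
  else acc

def pvBStep (pl rl : List String)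
    (st : PySem.Set String × List String × List String × List String) (skill : String) :
    PySem.Set String × List String × List String × List String :=
  if PySem.Set.contains st.1 skill then st
  else
    let seen := PySem.Set.add st.1 skill
    let low := PySem.Str.lower skill
    if pl.any (fun line => PySem.Str.isIn low line) then
      (seen, st.2.1, st.2.2.1, st.2.2.2 ++ [skill])
    else if rl.any (fun line => PySem.Str.isIn low line) then
      (seen, st.2.1 ++ [skill], st.2.2.1, st.2.2.2)
    else
      (seen, st.2.1, st.2.2.1 ++ [skill], st.2.2.2)

-- the fresh (not-yet-seen) elements of xs relative to a seen-list, in order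
def pvFresh (seen : List String) : List String → List String
  | [] => []
  | x :: xs => if seen.contains x then pvFresh seen xs else x :: pvFresh (seen ++ [x]) xs

theorem pvFoldlAdd_eq_append_fresh (xs : List String) :
    ∀ seen : List String, xs.foldl PySem.Set.add seen = seen ++ pvFresh seen xs := by
  induction xs with
  | nil => intro seen; simp [pvFresh]
  | cons x xs ih =>
    intro seen
    by_cases h : x ∈ seen
    · simp [pvFresh, h, PySem.Set.add, List.foldl_cons, ih]
    · simp [pvFresh, h, PySem.Set.add, List.foldl_cons, ih (seen ++ [x])]

theorem pvFresh_nil_eq_dedup (xs : List String) : pvFresh [] xs = PySem.List.dedup xs := by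
  have h := pvFoldlAdd_eq_append_fresh xs []
  simp only [List.nil_append] at h
  rw [PySem.List.dedup_eq_ofList, PySem.Set.ofList_eq_foldl, h]

theorem pvALoop (pl rl : List String) (xs : List String) :
    ∀ acc : List String × List String,
      xs.foldl (pvAStep pl rl) acc
        = (acc.1 ++ xs.filter (fun s => !pvHit pl s && pvHit rl s), acc.2 ++ xs.filter (pvHit pl)) := by
  induction xs with
  | nil => intro acc; simp
  | cons x xs ih =>
    intro acc
    rw [List.foldl_cons, ih]
    by_cases hp : (pl.any fun line => PySem.Str.isIn (PySem.Str.lower x) line) = true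
    · have hstep : pvAStep pl rl acc x = (acc.1, acc.2 ++ [x]) := by
        unfold pvAStep; rw [if_pos hp]
      have hPx : pvHit pl x = true := hp
      rw [hstep]
      simp [hPx, List.append_assoc]
    · by_cases hr : (rl.any fun line => PySem.Str.isIn (PySem.Str.lower x) line) = true
      · have hstep : pvAStep pl rl acc x = (acc.1 ++ [x], acc.2) := by
          unfold pvAStep; rw [if_neg hp, if_pos hr]
        have hPx : pvHit pl x = false := by simpa [pvHit] using hp
        have hRx : pvHit rl x = true := hr
        rw [hstep]
        simp [hPx, hRx, List.append_assoc]
      · have hstep : pvAStep pl rl acc x = acc := by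
          unfold pvAStep; rw [if_neg hp, if_neg hr]
        have hPx : pvHit pl x = false := by simpa [pvHit] using hp
        have hRx : pvHit rl x = false := by simpa [pvHit] using hr
        rw [hstep]
        simp [hPx, hRx]

theorem pvBLoop (pl rl : List String) (xs : List String) :
    ∀ (seen r l p : List String),
      xs.foldl (pvBStep pl rl) (seen, r, l, p)
        = (xs.foldl PySem.Set.add seen,
           r ++ (pvFresh seen xs).filter (fun s => !pvHit pl s && pvHit rl s),
           l ++ (pvFresh seen xs).filter (fun s => !pvHit pl s && !pvHit rl s),
           p ++ (pvFresh seen xs).filter (pvHit pl)) := by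
  induction xs with
  | nil => intro seen r l p; simp [pvFresh]
  | cons x xs ih =>
    intro seen r l p
    rw [List.foldl_cons]
    by_cases h : x ∈ seen
    · have hstep : pvBStep pl rl (seen, r, l, p) x = (seen, r, l, p) := by
        have hc : PySem.Set.contains seen x = true := by simp [PySem.Set.contains, h]
        unfold pvBStep
        dsimp only
        rw [if_pos hc]
      have hadd : PySem.Set.add seen x = seen := by simp [PySem.Set.add, h]
      rw [hstep, ih, List.foldl_cons, hadd]
      simp [pvFresh, h]
    · have hadd : PySem.Set.add seen x = seen ++ [x] := by simp [PySem.Set.add, h]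
      have hfr : pvFresh seen (x :: xs) = x :: pvFresh (seen ++ [x]) xs := by
        simp [pvFresh, h]
      by_cases hp : (pl.any fun line => PySem.Str.isIn (PySem.Str.lower x) line) = true
      · have hstep : pvBStep pl rl (seen, r, l, p) x = (seen ++ [x], r, l, p ++ [x]) := by
          have hc : ¬ PySem.Set.contains seen x = true := by simp [PySem.Set.contains, h]
          unfold pvBStep
          dsimp only
          rw [if_neg hc, if_pos hp, hadd]
        rw [hstep, ih, List.foldl_cons, hadd, hfr]
        have hPx : pvHit pl x = true := hp
        simp [hPx, List.append_assoc]
      · by_cases hr : (rl.any fun line => PySem.Str.isIn (PySem.Str.lower x) line) = true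
        · have hstep : pvBStep pl rl (seen, r, l, p) x = (seen ++ [x], r ++ [x], l, p) := by
            have hc : ¬ PySem.Set.contains seen x = true := by simp [PySem.Set.contains, h]
            unfold pvBStep
            dsimp only
            rw [if_neg hc, if_neg hp, if_pos hr, hadd]
          rw [hstep, ih, List.foldl_cons, hadd, hfr]
          have hPx : pvHit pl x = false := by simpa [pvHit] using hp
          have hRx : pvHit rl x = true := hr
          simp [hPx, hRx, List.append_assoc]
        · have hstep : pvBStep pl rl (seen, r, l, p) x = (seen ++ [x], r, l ++ [x], p) := by
            have hc : ¬ PySem.Set.contains seen x = true := by simp [PySem.Set.contains, h]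
            unfold pvBStep
            dsimp only
            rw [if_neg hc, if_neg hp, if_neg hr, hadd]
          rw [hstep, ih, List.foldl_cons, hadd, hfr]
          have hPx : pvHit pl x = false := by simpa [pvHit] using hp
          have hRx : pvHit rl x = false := by simpa [pvHit] using hr
          simp [hPx, hRx, List.append_assoc]

theorem pvOfListFilter (p : String → Bool) (xs : List String) :
    ∀ acc : List String,
      (xs.filter p).foldl PySem.Set.add (acc.filter p) = (xs.foldl PySem.Set.add acc).filter p := by
  induction xs with
  | nil => intro acc; simp
  | cons x xs ih =>
    intro acc
    by_cases hp : p x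
    · by_cases hm : x ∈ acc
      · have h1 : PySem.Set.add acc x = acc := by simp [PySem.Set.add, hm]
        have h2 : PySem.Set.add (acc.filter p) x = acc.filter p := by
          simp [PySem.Set.add, List.mem_filter, hm, hp]
        simp only [List.filter_cons, hp, if_true, List.foldl_cons, h1, h2]
        exact ih acc
      · have h1 : PySem.Set.add acc x = acc ++ [x] := by simp [PySem.Set.add, hm]
        have h2 : PySem.Set.add (acc.filter p) x = (acc ++ [x]).filter p := by
          simp [PySem.Set.add, List.mem_filter, hm, hp, List.filter_append]
        simp only [List.filter_cons, hp, if_true, List.foldl_cons, h1, h2]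
        exact ih (acc ++ [x])
    · have h1 : (PySem.Set.add acc x).filter p = acc.filter p := by
        by_cases hm : x ∈ acc
        · simp [PySem.Set.add, hm]
        · simp [PySem.Set.add, hm, List.filter_append, hp]
      simp only [List.filter_cons, hp, Bool.false_eq_true, if_false, List.foldl_cons]
      rw [← ih (PySem.Set.add acc x), h1]

theorem pvDedup_filter (p : String → Bool) (xs : List String) :
    PySem.List.dedup (xs.filter p) = (PySem.List.dedup xs).filter p := by
  have h := pvOfListFilter p xs []
  simp only [List.filter_nil] at h
  rw [PySem.List.dedup_eq_ofList, PySem.List.dedup_eq_ofList, PySem.Set.ofList_eq_foldl,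
      PySem.Set.ofList_eq_foldl, h]

theorem pvFoldlAdd_append (b : List String) :
    ∀ (s t : List String), (∀ x ∈ b, x ∉ s) →
      b.foldl PySem.Set.add (s ++ t) = s ++ b.foldl PySem.Set.add t := by
  induction b with
  | nil => intro s t _; simp
  | cons x b ih =>
    intro s t h
    have hxs : x ∉ s := h x (by simp)
    have hnext : ∀ y ∈ b, y ∉ s := fun y hy => h y (by simp [hy])
    by_cases hm : x ∈ t
    · have h1 : PySem.Set.add (s ++ t) x = s ++ t := by simp [PySem.Set.add, hm]
      have h2 : PySem.Set.add t x = t := by simp [PySem.Set.add, hm]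
      simp only [List.foldl_cons, h1, h2]
      exact ih s t hnext
    · have h1 : PySem.Set.add (s ++ t) x = s ++ (t ++ [x]) := by
        simp [PySem.Set.add, hm, hxs, List.append_assoc]
      have h2 : PySem.Set.add t x = t ++ [x] := by simp [PySem.Set.add, hm]
      simp only [List.foldl_cons, h1, h2]
      exact ih s (t ++ [x]) hnext

theorem pvDedup_append_disjoint (a b : List String) (h : ∀ x ∈ b, x ∉ a) :
    PySem.List.dedup (a ++ b) = PySem.List.dedup a ++ PySem.List.dedup b := by
  have hb : ∀ x ∈ b, x ∉ PySem.Set.ofList a := by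
    intro x hx
    simpa [PySem.Set.mem_ofList] using h x hx
  have key := pvFoldlAdd_append b (PySem.Set.ofList a) [] hb
  simp only [List.append_nil] at key
  rw [PySem.List.dedup_eq_ofList, PySem.List.dedup_eq_ofList, PySem.List.dedup_eq_ofList,
      PySem.Set.ofList_eq_foldl, List.foldl_append, ← PySem.Set.ofList_eq_foldl, key,
      PySem.Set.ofList_eq_foldl, PySem.Set.ofList_eq_foldl]

theorem pvKey (pl rl : List String) (xs : List String) :
    (let rp := xs.foldl (pvAStep pl rl) ([], [])
     let remaining := xs.filter (fun skill => !(rp.1.contains skill) && !(rp.2.contains skill))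
     let required := PySem.List.dedup (rp.1 ++ remaining)
     let preferred := (PySem.List.dedup rp.2).filter (fun skill => !(required.contains skill))
     ((required, preferred) : List String × List String))
    = (let st := xs.foldl (pvBStep pl rl) (PySem.Set.empty, [], [], [])
       (st.2.1 ++ st.2.2.1, st.2.2.2)) := by
  have hA := pvALoop pl rl xs ([], [])
  have hB := pvBLoop pl rl xs [] [] [] []
  simp only [List.nil_append] at hA hB
  show (let rp := xs.foldl (pvAStep pl rl) ([], []); _) = _
  rw [hA]
  show _ = (let st := xs.foldl (pvBStep pl rl) (PySem.Set.empty, [], [], []); _)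
  rw [show (PySem.Set.empty : PySem.Set String) = ([] : List String) from rfl, hB]
  simp only []
  rw [pvFresh_nil_eq_dedup]
  have hrem : List.filter
        (fun skill =>
          !(List.filter (fun s => !pvHit pl s && pvHit rl s) xs).contains skill &&
            !(List.filter (pvHit pl) xs).contains skill) xs
      = List.filter (fun s => !pvHit pl s && !pvHit rl s) xs := by
    apply List.filter_congr
    intro y hy
    have h1 : (List.filter (fun s => !pvHit pl s && pvHit rl s) xs).contains y
        = (!pvHit pl y && pvHit rl y) := by
      cases hq : (!pvHit pl y && pvHit rl y) <;> simp [List.mem_filter, hq, hy]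
    have h2 : (List.filter (pvHit pl) xs).contains y = pvHit pl y := by
      cases hq : pvHit pl y <;> simp [List.mem_filter, hq, hy]
    rw [h1, h2]
    cases pvHit pl y <;> cases pvHit rl y <;> simp
  rw [hrem]
  have hdisj : ∀ y ∈ List.filter (fun s => !pvHit pl s && !pvHit rl s) xs,
      y ∉ List.filter (fun s => !pvHit pl s && pvHit rl s) xs := by
    intro y hy hmem
    simp only [List.mem_filter, Bool.and_eq_true, Bool.not_eq_true'] at hy hmem
    exact absurd hmem.2.2 (by simp [hy.2.2])
  rw [pvDedup_append_disjoint _ _ hdisj, pvDedup_filter, pvDedup_filter, pvDedup_filter]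
  have hid : List.filter
      (fun skill =>
        !(List.filter (fun s => !pvHit pl s && pvHit rl s) (PySem.List.dedup xs) ++
            List.filter (fun s => !pvHit pl s && !pvHit rl s) (PySem.List.dedup xs)).contains skill)
      (List.filter (pvHit pl) (PySem.List.dedup xs))
      = List.filter (pvHit pl) (PySem.List.dedup xs) := by
    apply List.filter_eq_self.mpr
    intro y hy
    have hP : pvHit pl y = true := (List.mem_filter.mp hy).2
    simp [List.mem_filter, hP]
  rw [hid]

-- ===== VERDICT (by name: the statement is the Claim_ definition above) =====
theorem split_required_and_preferred_skills_py_spec : Claim_equal_split_required_and_preferred_skills_py := by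
  intro text xs _h
  unfold Spec_split_required_and_preferred_skills_py
  unfold split_required_and_preferred_skills_py split_required_and_preferred_skills_py_alt
  exact pvKey _ _ xs
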